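-- pv_equiv track=rewrite | github.com/pypi-data/pypi-mirror-189 | packages/dsalgo/dsalgo-0.2.5.tar.gz/dsalgo-0.2.5/dsalgo/euler_tour.py | to_nodes
-- ===== SOURCE A (Python) =====
-- import typing
--
-- def to_nodes(tour_edges: list[int]) -> list[int]:
--     """Convert Euler-tour-on-edges to Euler-tour-on-nodes.
--
--     Args:
--         tour_edges (list[int]): euler tour on edges.
--
--     Returns:
--         list[int]: euler tour on nodes.
--
--     Examples:
--         >>> tour_edges = [0, 1, 4, -5, 2, -3, -2, 3, -4, -1]
--         >>> to_nodes(tour_edges)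
--         [0, 1, 4, 1, 2, 1, 0, 3, 0]
--     """
--     parent = compute_parent(tour_edges)
--     tour_nodes: list[int] = []
--     for u in tour_edges[:-1]:
--         if u >= 0:
--             tour_nodes.append(u)
--         else:
--             p = parent[~u]
--             assert p is not None
--             tour_nodes.append(p)
--     return tour_nodes
--
-- def compute_parent(
--     tour_edges: list[int],
-- ) -> list[typing.Optional[int]]:
--     """Compute parent from Euler-tour-on-edges.
--
--     Args:
--         tour_edges (list[int]): euler tour on edges.
--
--     Returns:
--         list[typing.Optional[int]]:
--             parent list.
--             the tour root's parent is None.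
--
--     Examples:
--         >>> tour_edges = [0, 1, 4, -5, 2, -3, -2, 3, -4, -1]
--         >>> compute_parent(tour_edges)
--         [None, 0, 1, 0, 1]
--     """
--     n = len(tour_edges) >> 1
--     parent: list[typing.Optional[int]] = [None] * n
--     st = [tour_edges[0]]
--     for u in tour_edges[1:]:
--         if u < 0:
--             st.pop()
--             continue
--         parent[u] = st[-1]
--         st.append(u)
--
--     return parent
-- ===== SOURCE B (Python) =====
-- def to_nodes(tour_edges: list[int]) -> list[int]:
--     """Single-pass conversion: keep the live stack of open nodes instead of a parent table."""
--     stack = [tour_edges[0]]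
--     tour_nodes: list[int] = []
--     for u in tour_edges[:-1]:
--         if u >= 0:
--             tour_nodes.append(u)
--             stack.append(u)
--         else:
--             v = stack.pop()
--             assert u == ~v  # a leave event must close the innermost open node
--             tour_nodes.append(stack[-1])
--     return tour_nodes
-- ===== Notes on version B (the rewrite author's own statement) =====
-- stated objective: simpler
-- what changed: B replaces A's two passes (build a parent table with compute_parent, then a lookup pass) by a single pass that keeps the live stack of open nodes and reads the parent directly off the stack after each pop.
-- outside the precondition, e.g. on to_nodes([0, 1, 1, -2, -2, -1]): A returns [0, 1, 1, 1, 1], B returns [0, 1, 1, 1, 0]; on to_nodes([-1, 0]): A returns [-1], B raises AssertionError; on to_nodes([0, 1, -2, 1]): A returns [0, 1, 0], B returns [0, 1, 0]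
import Mathlib
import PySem

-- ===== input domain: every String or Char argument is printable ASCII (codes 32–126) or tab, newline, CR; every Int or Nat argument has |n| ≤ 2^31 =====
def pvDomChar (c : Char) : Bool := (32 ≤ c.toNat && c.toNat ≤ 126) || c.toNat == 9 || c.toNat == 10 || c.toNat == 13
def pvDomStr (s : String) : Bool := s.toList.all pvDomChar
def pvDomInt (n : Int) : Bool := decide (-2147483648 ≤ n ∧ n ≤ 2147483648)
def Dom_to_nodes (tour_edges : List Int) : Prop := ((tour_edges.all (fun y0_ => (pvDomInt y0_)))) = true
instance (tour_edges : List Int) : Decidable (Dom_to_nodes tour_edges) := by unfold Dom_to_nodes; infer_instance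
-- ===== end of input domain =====

-- B replaces A's two passes (parent table + lookup pass) by one pass over a live stack of
-- open nodes; objective: simpler (same O(n) cost). Return values only; neither mutates its input.

-- ===== PORT A =====
-- Stacks are kept head-first (Python's list end = our head). Where Python raises
-- (tour_edges[0] on [], st.pop()/st[-1] on an empty stack, parent[u] out of range,
-- `assert p is not None`) the port uses a harmless default; all such inputs are
-- excluded by Pre_to_nodes.
def parStep (s : List (Option Int) × List Int) (u : Int) : List (Option Int) × List Int :=
  if u < 0 then (s.1, s.2.tail)                                -- st.pop(); continue
  else (s.1.set u.toNat (some (s.2.headD 0)), u :: s.2)        -- parent[u] = st[-1]; st.append(u)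

def compute_parent (tour_edges : List Int) : List (Option Int) :=
  let n := tour_edges.length / 2
  let parent : List (Option Int) := List.replicate n none
  let st : List Int := [tour_edges.headD 0]                    -- st = [tour_edges[0]]
  ((tour_edges.drop 1).foldl parStep (parent, st)).1           -- for u in tour_edges[1:]

-- p = parent[~u]; assert p is not None  (out-of-range / None are excluded by Pre_)
def parentAt (parent : List (Option Int)) (u : Int) : Int :=
  (parent.getD (-u - 1).toNat none).getD 0

def to_nodes (tour_edges : List Int) : List Int :=
  let parent := compute_parent tour_edges
  tour_edges.dropLast.foldl                                    -- for u in tour_edges[:-1]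
    (fun tour_nodes u =>
      if 0 ≤ u then tour_nodes ++ [u]
      else tour_nodes ++ [parentAt parent u]) []

-- ===== PORT B =====
-- Same stack convention (head = Python's last element); tour_edges[0] on [],
-- stack[-1] on an emptied stack and the `assert u == ~v` sanity check raise in
-- Python and are excluded by Pre_to_nodes (the assert never alters a returned
-- value, so the passing path below is exact).
def altStep (s : List Int × List Int) (u : Int) : List Int × List Int :=
  if 0 ≤ u then (s.1 ++ [u], u :: s.2)                         -- append u; push u
  else (s.1 ++ [s.2.tail.headD 0], s.2.tail)                   -- v = pop; assert; append stack[-1]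

def to_nodes_alt (tour_edges : List Int) : List Int :=
  let stack : List Int := [tour_edges.headD 0]                 -- stack = [tour_edges[0]]
  (tour_edges.dropLast.foldl altStep ([], stack)).1            -- for u in tour_edges[:-1]

-- ===== PRECONDITION & SPEC =====
-- chkTour st ys: reading u ≥ 0 as "enter node u" and u < 0 as "leave node ~u", ys is
-- balanced over the open-node stack st, every leave matches the innermost open node,
-- the bottom (root) entry is never closed, and at the end exactly the root is open.
def chkTour : List Int → List Int → Bool
  | _, [] => true
  | st, u :: ys =>
      if 0 ≤ u then chkTour (u :: st) ys
      else
        match st with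
        | v :: v' :: st' => (u == -v - 1) && chkTour (v' :: st') ys
        | _ => false

-- Pre_ admits (i) the lists whose elements before the last are all nonnegative and
-- in range (this covers every singleton and every such A-returning degenerate list:
-- no pop or parent lookup ever happens and both sides return the input minus its
-- last element), and (ii) the tours whose interior is a well-formed walk on one tree
-- (leaves match the innermost open node, distinct node labels, all < n = len/2; the
-- final element is only sifted by compute_parent, never read back). It excludes
-- the remaining malformed tours: A raises on most of them, and where A still
-- returns (duplicate node labels, unbalanced tails) its value comes from a stale
-- parent-table entry or leftover stack state — a defensible corner on which B's
-- live-stack answer is equally valid (see claim cites).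
def Pre_to_nodes (tour_edges : List Int) : Prop :=
  (tour_edges ≠ [] ∧ (∀ u ∈ tour_edges.dropLast, 0 ≤ u)
      ∧ ∀ u ∈ tour_edges.drop 1, 0 ≤ u → u < ((tour_edges.length / 2 : Nat) : Int))
  ∨ (2 ≤ tour_edges.length ∧ 0 ≤ tour_edges.headD 0
      ∧ chkTour [tour_edges.headD 0] tour_edges.tail.dropLast = true
      ∧ (tour_edges.filter (fun u => decide (0 ≤ u))).Nodup
      ∧ ∀ u ∈ tour_edges, 0 ≤ u → u < ((tour_edges.length / 2 : Nat) : Int))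

instance (tour_edges : List Int) : Decidable (Pre_to_nodes tour_edges) := by
  unfold Pre_to_nodes; infer_instance

def pvWitness_to_nodes : List Int := [0, 1, 4, -5, 2, -3, -2, 3, -4, -1]

def Spec_to_nodes (tour_edges : List Int) (out : List Int) : Prop := out = to_nodes_alt tour_edges
instance (tour_edges : List Int) (out : List Int) : Decidable (Spec_to_nodes tour_edges out) := by unfold Spec_to_nodes; infer_instance

-- ===== CLAIM (what is proved, stated in full; the proofs are below) =====
def Claim_equal_to_nodes : Prop := ∀ (tour_edges : List Int), Dom_to_nodes tour_edges → Pre_to_nodes tour_edges → Spec_to_nodes tour_edges (to_nodes tour_edges)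

-- ===== LEMMAS AND PROOFS =====

-- nonnegative entries of a list (the "enter node" events)
def posL (ys : List Int) : List Int := ys.filter (fun u => decide (0 ≤ u))

-- the per-element value A's second pass appends, as a function of a parent table
def gmap (par : List (Option Int)) (u : Int) : Int :=
  if 0 ≤ u then u else parentAt par u

lemma mem_posL {ys : List Int} {p : Int} (h : p ∈ posL ys) : p ∈ ys ∧ 0 ≤ p := by
  unfold posL at h
  have := List.mem_filter.mp h
  exact ⟨this.1, by simpa using this.2⟩

-- THE MAIN INVARIANT: over a balanced segment ys (never closing the stack bottom),
-- A's parent pass only writes the entries of nodes entered in ys, and B's one pass,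
-- run with one extra sentinel below the stack, emits exactly the values A's second
-- pass will read off the final parent table.
lemma main_invariant :
    ∀ (ys st : List Int) (par : List (Option Int)) (res : List Int) (b : Int),
      chkTour st ys = true →
      List.IsChain (fun a a' => par.getD a.toNat none = some a') st →
      (posL ys).Nodup →
      (∀ p ∈ posL ys, p ∉ st) →
      (∀ p ∈ posL ys, p.toNat < par.length) →
      (∀ a ∈ st, 0 ≤ a) →
      (∀ i : Nat, (∀ p ∈ posL ys, p.toNat ≠ i) →
          (ys.foldl parStep (par, st)).1.getD i none = par.getD i none)
        ∧ (ys.foldl parStep (par, st)).1.length = par.length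
        ∧ (ys.foldl altStep (res, st ++ [b])).1
            = res ++ ys.map (gmap ((ys.foldl parStep (par, st)).1))
        ∧ (∀ u ∈ ys, u < 0 → (-u - 1) ∈ st ++ posL ys) := by
  intro ys
  induction ys with
  | nil => intro st par res b _ _ _ _ _ _; exact ⟨fun _ _ => rfl, rfl, by simp, by simp⟩
  | cons u ys ih =>
    intro st par res b hchk hchain hnd hnotin hlt hst
    by_cases hu : 0 ≤ u
    · -- enter node u
      have hposL : posL (u :: ys) = u :: posL ys := by simp [posL, hu]
      rw [hposL] at hnd hnotin hlt
      have hchk' : chkTour (u :: st) ys = true := by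
        simpa [chkTour, hu] using hchk
      have huU : u ∉ posL ys := (List.nodup_cons.mp hnd).1
      have hndU : (posL ys).Nodup := (List.nodup_cons.mp hnd).2
      have hult : u.toNat < par.length := hlt u (by simp)
      have hunotst : u ∉ st := hnotin u (by simp)
      set par2 := par.set u.toNat (some (st.headD 0)) with hpar2
      have htrans : List.IsChain (fun a a' => par2.getD a.toNat none = some a') st := by
        refine List.IsChain.imp_of_mem_imp (fun a b2 ha _ h => ?_) hchain
        have hane : u.toNat ≠ a.toNat := by
          have h0 : 0 ≤ a := hst a ha
          have : a ≠ u := fun he => hunotst (he ▸ ha)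
          omega
        simpa [hpar2, List.getD_eq_getElem?_getD, List.getElem?_set_ne hane] using h
      have hchain2 : List.IsChain (fun a a' => par2.getD a.toNat none = some a') (u :: st) := by
        cases st with
        | nil => exact List.isChain_singleton u
        | cons z zs =>
          refine List.isChain_cons_cons.mpr ⟨?_, htrans⟩
          simp [hpar2, List.getD_eq_getElem?_getD, List.getElem?_set_self hult]
      have hrec := ih (u :: st) par2 (res ++ [u]) b hchk' hchain2 hndU
        (by intro p hp hmem
            rcases List.mem_cons.mp hmem with rfl | hmem'
            · exact huU hp
            · exact hnotin p (List.mem_cons_of_mem _ hp) hmem')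
        (by intro p hp
            have := hlt p (List.mem_cons_of_mem _ hp)
            simpa [hpar2] using this)
        (by intro a ha; rcases List.mem_cons.mp ha with rfl | ha'
            · exact hu
            · exact hst a ha')
      have hfoldA : (u :: ys).foldl parStep (par, st) = ys.foldl parStep (par2, u :: st) := by
        simp [parStep, hpar2, not_lt.mpr hu]
      have hfoldB : (u :: ys).foldl altStep (res, st ++ [b])
          = ys.foldl altStep (res ++ [u], (u :: st) ++ [b]) := by
        simp [altStep, hu]
      refine ⟨?_, ?_, ?_, ?_⟩
      · intro i hi
        rw [hposL] at hi
        rw [hfoldA, hrec.1 i (fun p hp => hi p (List.mem_cons_of_mem _ hp))]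
        have hne : u.toNat ≠ i := hi u List.mem_cons_self
        simp [hpar2, List.getD_eq_getElem?_getD, List.getElem?_set_ne hne]
      · rw [hfoldA, hrec.2.1]; simp [hpar2]
      · rw [hfoldB, hrec.2.2.1, hfoldA]
        have : gmap ((ys.foldl parStep (par2, u :: st)).1) u = u := by simp [gmap, hu]
        simp [this]
      · intro w hw hwneg
        rcases List.mem_cons.mp hw with rfl | hw'
        · omega
        · have := hrec.2.2.2 w hw' hwneg
          rw [hposL]
          simp only [List.mem_append, List.mem_cons] at this ⊢
          tauto
    · -- leave a node: the stack must have shape v :: v' :: st' with u = -v-1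
      have hu' : ¬ (0 ≤ u) := hu
      have hposL : posL (u :: ys) = posL ys := by simp [posL, hu']
      rw [hposL] at hnd hnotin hlt
      rcases st with _ | ⟨v, _ | ⟨v', st'⟩⟩
      · exfalso; simp [chkTour, hu'] at hchk
      · exfalso; simp [chkTour, hu'] at hchk
      · have hchk2 : u = -v - 1 ∧ chkTour (v' :: st') ys = true := by
          simpa [chkTour, hu'] using hchk
        obtain ⟨huv, hchk'⟩ := hchk2
        have hchaint : List.IsChain (fun a a' => par.getD a.toNat none = some a') (v' :: st') :=
          (List.isChain_cons_cons.mp hchain).2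
        have hvv' : par.getD v.toNat none = some v' := (List.isChain_cons_cons.mp hchain).1
        have hrec := ih (v' :: st') par (res ++ [v']) b hchk' hchaint hnd
          (fun p hp => fun hmem => hnotin p hp (by simp at hmem ⊢; tauto))
          hlt
          (fun a ha => hst a (by simp at ha ⊢; tauto))
        have hfoldA : (u :: ys).foldl parStep (par, v :: v' :: st')
            = ys.foldl parStep (par, v' :: st') := by
          have : u < 0 := by omega
          simp [parStep, this]
        have hfoldB : (u :: ys).foldl altStep (res, (v :: v' :: st') ++ [b])
            = ys.foldl altStep (res ++ [v'], (v' :: st') ++ [b]) := by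
          simp [altStep, hu']
        refine ⟨?_, ?_, ?_, ?_⟩
        · intro i hi; rw [hposL] at hi; rw [hfoldA]; exact hrec.1 i hi
        · rw [hfoldA]; exact hrec.2.1
        · rw [hfoldB, hrec.2.2.1, hfoldA]
          have hval : gmap ((ys.foldl parStep (par, v' :: st')).1) u = v' := by
            have hvz : 0 ≤ v := hst v (by simp)
            have hfr : (ys.foldl parStep (par, v' :: st')).1.getD v.toNat none
                = par.getD v.toNat none := by
              refine hrec.1 v.toNat (fun p hp => ?_)
              have h0p : 0 ≤ p := (mem_posL hp).2
              have : p ≠ v := fun he => hnotin p hp (by simp [he])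
              omega
            have hidx : (-u - 1) = v := by omega
            have hsome : (ys.foldl parStep (par, v' :: st')).1[v.toNat]?.getD none = some v' := by
              rw [← List.getD_eq_getElem?_getD, hfr, hvv']
            simp [gmap, hu', parentAt, hidx, List.getD_eq_getElem?_getD, hsome]
          simp [hval]
        · intro w hw hwneg
          rcases List.mem_cons.mp hw with rfl | hw'
          · have : (-w - 1) = v := by omega
            rw [hposL, this]; simp
          · have := hrec.2.2.2 w hw' hwneg
            rw [hposL]
            simp only [List.mem_append, List.mem_cons] at this ⊢
            tauto

-- the second pass of A is a map
lemma foldA_eq_map (P : List (Option Int)) :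
    ∀ (l : List Int) (acc : List Int),
      l.foldl (fun tour_nodes u =>
        if 0 ≤ u then tour_nodes ++ [u] else tour_nodes ++ [parentAt P u]) acc
      = acc ++ l.map (gmap P) := by
  intro l
  induction l with
  | nil => intro acc; simp
  | cons u ys ih =>
    intro acc
    by_cases hu : 0 ≤ u <;> simp [ih, gmap, hu]

-- on an all-nonnegative segment B's pass only appends and pushes
lemma foldB_allpos :
    ∀ (l : List Int) (res st : List Int), (∀ u ∈ l, 0 ≤ u) →
      (l.foldl altStep (res, st)).1 = res ++ l := by
  intro l
  induction l with
  | nil => intro res st _; simp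
  | cons u ys ih =>
    intro res st h
    have hu : 0 ≤ u := h u (by simp)
    simp only [List.foldl_cons, altStep, if_pos hu]
    rw [ih (res ++ [u]) (u :: st) (fun p hp => h p (by simp [hp]))]
    simp

-- the second-pass map only reads the table at the complements of its negatives
lemma map_gmap_congr (P Q : List (Option Int)) (l : List Int)
    (h : ∀ u ∈ l, u < 0 → P.getD (-u - 1).toNat none = Q.getD (-u - 1).toNat none) :
    l.map (gmap P) = l.map (gmap Q) := by
  apply List.map_congr_left
  intro u hu
  by_cases h0 : 0 ≤ u
  · simp [gmap, h0]
  · have hh := h u hu (by omega)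
    simp only [gmap, if_neg h0, parentAt]
    rw [hh]

theorem to_nodes_spec : Claim_equal_to_nodes := by
  unfold Claim_equal_to_nodes
  intro t _ hpre
  unfold Spec_to_nodes
  rcases hpre with ⟨hne, hpos, _⟩ | ⟨hlen, hr, hchk, hnodup, hbound⟩
  · -- all entries before the last nonnegative: no pop, no parent lookup;
    -- both sides return t.dropLast
    have hposd : ∀ u ∈ t.dropLast, 0 ≤ u := hpos
    have hA : to_nodes t = t.dropLast := by
      simp only [to_nodes]
      rw [foldA_eq_map]
      simp only [List.nil_append]
      have : ∀ u ∈ t.dropLast, gmap (compute_parent t) u = u := by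
        intro u hu; simp [gmap, hposd u hu]
      calc t.dropLast.map (gmap (compute_parent t))
          = t.dropLast.map id := List.map_congr_left this
        _ = t.dropLast := List.map_id _
    have hB : to_nodes_alt t = t.dropLast := by
      simp only [to_nodes_alt]
      rw [foldB_allpos _ _ _ hposd]
      simp
    rw [hA, hB]
  · -- interior of the input is a well-formed walk on one tree
    match t, hlen with
    | r :: rest, hl =>
      simp at hr hchk
      have hrestne : rest ≠ [] := by
        intro h; subst h; simp at hl
      set mid := rest.dropLast with hmid
      set e := rest.getLast hrestne with he_def
      have hrest : rest = mid ++ [e] := (List.dropLast_concat_getLast hrestne).symm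
      have hdl : (r :: rest).dropLast = r :: mid := by
        rw [hmid, List.dropLast_cons_of_ne_nil hrestne]
      -- the positives of the tour are r, then those of mid, then those of [e]
      have hfil : (r :: rest).filter (fun u => decide (0 ≤ u))
          = r :: (posL mid ++ posL [e]) := by
        simp [hrest, posL, List.filter_append, hr]
      rw [hfil] at hnodup
      obtain ⟨hrnot, hnd2⟩ := List.nodup_cons.mp hnodup
      have hndb : (posL mid).Nodup := (List.nodup_append.mp hnd2).1
      have hdisj : ∀ a ∈ posL mid, a ∉ posL [e] := by
        intro a ha hb
        exact (List.nodup_append.mp hnd2).2.2 a ha a hb rfl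
      have hrnotmid : r ∉ posL mid := fun h => hrnot (List.mem_append_left _ h)
      set n := (r :: rest).length / 2 with hn
      set P0 : List (Option Int) := List.replicate n none with hP0
      have hmemb : ∀ p ∈ posL mid, p ∈ (r :: rest) := by
        intro p hp
        have h1 : p ∈ mid := (mem_posL hp).1
        have h2 : p ∈ rest := by rw [hrest]; exact List.mem_append_left _ h1
        exact List.mem_cons_of_mem _ h2
      have hinv := main_invariant mid [r] P0 [r] r hchk
        (List.isChain_singleton r) hndb
        (by intro p hp; simp; intro he; exact hrnotmid (he ▸ hp))
        (by intro p hp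
            have h0 : 0 ≤ p := (mem_posL hp).2
            have hb2 := hbound p (hmemb p hp) h0
            have : P0.length = n := by simp [hP0]
            rw [this]; omega)
        (by intro a ha; simp at ha; omega)
      -- the final table: the mid-table, then one parStep on e
      have h1 : compute_parent (r :: rest) = (parStep (mid.foldl parStep (P0, [r])) e).1 := by
        have h0 : compute_parent (r :: rest) = (rest.foldl parStep (P0, [r])).1 := rfl
        rw [h0, hrest, List.foldl_append, List.foldl_cons, List.foldl_nil]
      -- the second pass never reads the entry e writes
      have hreads : ∀ u ∈ r :: mid, u < 0 →
          (compute_parent (r :: rest)).getD (-u - 1).toNat none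
            = ((mid.foldl parStep (P0, [r])).1).getD (-u - 1).toNat none := by
        intro u hu hneg
        rcases List.mem_cons.mp hu with rfl | humid
        · omega
        by_cases he : e < 0
        · rw [h1]; simp [parStep, he]
        · have hmem := hinv.2.2.2 u humid hneg
          have h0e : 0 ≤ e := by omega
          have hpe : posL [e] = [e] := by simp [posL, h0e]
          have her : e ≠ r := by
            intro hh
            exact hrnot (List.mem_append_right _ (by rw [hpe, hh]; simp))
          have hem : e ∉ posL mid := fun hh => hdisj e hh (by simp [hpe])
          have hne : e.toNat ≠ (-u - 1).toNat := by
            rcases List.mem_append.mp hmem with hm | hm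
            · have : -u - 1 = r := by simpa using hm
              omega
            · have h0m : 0 ≤ -u - 1 := (mem_posL hm).2
              have hne2 : e ≠ -u - 1 := fun hh => hem (hh ▸ hm)
              omega
          rw [h1]
          simp only [parStep, if_neg he]
          rw [List.getD_eq_getElem?_getD, List.getD_eq_getElem?_getD,
            List.getElem?_set_ne hne]
      -- A's side
      have hA : to_nodes (r :: rest)
          = (r :: mid).map (gmap (compute_parent (r :: rest))) := by
        simp only [to_nodes, hdl]
        rw [foldA_eq_map]
        simp
      have hmapeq : (r :: mid).map (gmap (compute_parent (r :: rest)))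
          = (r :: mid).map (gmap ((mid.foldl parStep (P0, [r])).1)) :=
        map_gmap_congr _ _ _ hreads
      -- B's side
      have hB : to_nodes_alt (r :: rest)
          = [r] ++ mid.map (gmap ((mid.foldl parStep (P0, [r])).1)) := by
        simp only [to_nodes_alt, hdl, List.headD_cons]
        have hstep : altStep ([], [r]) r = ([r], [r] ++ [r]) := by simp [altStep, hr]
        rw [List.foldl_cons, hstep, hinv.2.2.1]
      rw [hA, hmapeq, hB]
      simp [gmap, hr]
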